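-- pv_equiv track=rewrite | github.com/dukelw/mining-high-utility-itemsets-from-unstable-negative-profit-databases | tkhuim_ga.py | initial_solutions
-- ===== SOURCE A (Python) =====
-- def TU(transaction: list) -> int:
--     """
--     Calculates the total utility of a transaction.
--
--     This function takes a transaction (represented as a list) and returns the sum of the quantities
--     of items in the transaction. Each quantity is multiplied by its respective profit, as given in the
--     transaction.
--
--     Parameters:
--     transaction (list): A list representing a transaction. The list contains three elements:
--         - Transaction ID (string)
--         - List of items (list of strings)
--         - List of quantities (list of integers) multiplied by their respective profits (list of integers)
--
--     Returns:
--     int: The total utility of the transaction, calculated as the sum of the quantities of items.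
--     """
--     return sum(transaction[2])
--
-- def get_top_m_items(transaction: list, m: int) -> list:
--     """
--     Extracts the top 'm' items with the highest utilities from a given transaction.
--
--     Parameters:
--     transaction (list): A list representing a transaction. The list contains three elements:
--         - Transaction ID (string)
--         - List of items (list of strings)
--         - List of quantities (list of integers) multiplied by their respective profits (list of integers)
--
--     m (int): The number of top items to extract.
--
--     Returns:
--     list: A list containing the transaction ID, the top 'm' items, and their corresponding utilities.
--     """
--     items_with_utilities = list(zip(transaction[1], transaction[2]))
--     items_with_utilities.sort(key=lambda x: x[1], reverse=True)
--     top_m_items = items_with_utilities[:m]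
--     top_items = [item[0] for item in top_m_items]
--     top_utilities = [item[1] for item in top_m_items]
--     return [transaction[0], top_items, top_utilities]
--
-- def initial_solutions(dataset: list, n: int, m: int) -> list:
--     """
--     This function generates initial solutions for the Top-k High Utility Itemset Mining (TKHUIM) problem.
--
--     Parameters:
--     dataset (list): A list of transactions. Each transaction is represented as a list containing:
--         - Transaction ID (string)
--         - List of items (list of strings)
--         - List of quantities (list of integers) multiplied by their respective profits (list of integers)
--
--     n (int): The number of initial solutions to generate.
--
--     m (int): The number of top items to extract from each transaction.
--
--     Returns:
--     P (list): A list of initial solutions, where each solution is represented as a list of item names.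
--     """
--     trans_P = []
--     P = []
--     for Ty in dataset:
--         u = TU(Ty)
--         X = get_top_m_items(Ty, m)
--         if len(P) < n:
--             trans_P.append(X)
--             P.append(X[1])
--         else:
--             min_utility = min(trans_P, key=TU)
--             if u > TU(min_utility):
--                 trans_P.remove(min_utility)
--                 P.remove(min_utility[1])
--                 trans_P.append(X)
--                 P.append(X[1])
--     return P
-- ===== SOURCE B (Python) =====
-- def _top_m(transaction, m):
--     """Return (score, items): the transaction's top-m items by utility
--     (stable, descending) and the sum of those top-m utilities."""
--     pairs = list(zip(transaction[1], transaction[2]))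
--     pairs.sort(key=lambda x: x[1], reverse=True)
--     top = pairs[:m]
--     return sum(p[1] for p in top), [p[0] for p in top]
--
--
-- def _insert(pool, rec):
--     """Insert rec into pool, kept ascending by (score, append order):
--     rec goes after every record whose score is <= its own."""
--     i = 0
--     while i < len(pool) and pool[i][0] <= rec[0]:
--         i += 1
--     return pool[:i] + [rec] + pool[i:]
--
--
-- def initial_solutions(dataset, n, m):
--     # pool: records (score, append_index, items) kept sorted ascending by
--     # (score, append_index), so the eviction candidate is always pool[0].
--     pool = []
--     P = []
--     k = 0
--     for Ty in dataset:
--         if len(P) < n: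
--             score, items = _top_m(Ty, m)
--             pool = _insert(pool, (score, k, items))
--             P.append(items)
--         else:
--             u = sum(Ty[2])
--             if pool and u > pool[0][0]:
--                 evicted = pool[0]
--                 score, items = _top_m(Ty, m)
--                 pool = _insert(pool[1:], (score, k, items))
--                 P.remove(evicted[2])
--                 P.append(items)
--         k += 1
--     return P
-- ===== Notes on version B (the rewrite author's own statement) =====
-- stated objective: alternative
-- what changed: B keeps the candidate records in a pool sorted ascending by (top-m utility, append order), so the eviction candidate is always the pool head (with an ordered insert on acceptance) instead of A's per-transaction min-scan that re-sums every kept record's utilities; B also skips computing a rejected transaction's top-m list entirely.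
import Mathlib
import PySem

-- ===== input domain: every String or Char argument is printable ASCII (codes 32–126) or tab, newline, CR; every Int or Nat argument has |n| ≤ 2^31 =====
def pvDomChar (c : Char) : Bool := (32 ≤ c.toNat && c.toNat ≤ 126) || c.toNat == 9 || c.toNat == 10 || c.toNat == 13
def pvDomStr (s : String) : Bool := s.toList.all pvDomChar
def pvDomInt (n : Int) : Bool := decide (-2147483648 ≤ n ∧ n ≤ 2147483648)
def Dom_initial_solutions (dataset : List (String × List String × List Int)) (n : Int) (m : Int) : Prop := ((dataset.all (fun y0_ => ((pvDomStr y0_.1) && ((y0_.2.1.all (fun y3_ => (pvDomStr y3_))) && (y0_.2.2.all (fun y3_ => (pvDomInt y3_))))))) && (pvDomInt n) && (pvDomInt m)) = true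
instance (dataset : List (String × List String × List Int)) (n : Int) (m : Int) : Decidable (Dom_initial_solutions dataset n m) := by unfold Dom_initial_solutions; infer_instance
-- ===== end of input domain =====

-- B replaces A's per-transaction linear min-scan over the kept transactions (which re-sums each
-- kept record's utilities on every scan) with a pool kept sorted ascending by (utility, append
-- order), so the eviction candidate is always the pool's head; objective: alternative.

-- ===== PORT A =====
def TU (transaction : String × List String × List Int) : Int :=
  transaction.2.2.sum

def get_top_m_items (transaction : String × List String × List Int) (m : Int) :
    String × List String × List Int :=
  let items_with_utilities := transaction.2.1.zip transaction.2.2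
  let sortedIwu := PySem.List.sorted items_with_utilities (fun x => x.2) true
  let top_m_items := PySem.List.slice sortedIwu none (some m)
  (transaction.1, top_m_items.map (fun item => item.1), top_m_items.map (fun item => item.2))

def stepA (n m : Int)
    (st : List (String × List String × List Int) × List (List String))
    (Ty : String × List String × List Int) :
    List (String × List String × List Int) × List (List String) :=
  let u := TU Ty
  let X := get_top_m_items Ty m
  let trans_P := st.1
  let P := st.2
  if (P.length : Int) < n then
    (trans_P ++ [X], P ++ [X.2.1])
  else
    match PySem.List.min? trans_P TU with
    | none => (trans_P, P)   -- Python raises ValueError here (min of empty); outside Pre_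
    | some min_utility =>
      if u > TU min_utility then
        let trans_P' := (PySem.List.remove? trans_P min_utility).getD trans_P
        let P' := (PySem.List.remove? P min_utility.2.1).getD P
        (trans_P' ++ [X], P' ++ [X.2.1])
      else (trans_P, P)

def initial_solutions (dataset : List (String × List String × List Int)) (n : Int) (m : Int) : List (List String) :=
  (dataset.foldl (stepA n m) ([], [])).2

-- ===== PORT B =====
def top_m_B (transaction : String × List String × List Int) (m : Int) : Int × List String :=
  let pairs := transaction.2.1.zip transaction.2.2
  let sortedPairs := PySem.List.sorted pairs (fun x => x.2) true
  let top := PySem.List.slice sortedPairs none (some m)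
  ((top.map (fun p => p.2)).sum, top.map (fun p => p.1))

-- the while loop of Source B's _insert: the first index whose record's score exceeds s
def insert_idx (s : Int) : List (Int × Int × List String) → Nat
  | [] => 0
  | h :: t => if h.1 ≤ s then insert_idx s t + 1 else 0

def insert_B (rec : Int × Int × List String) (pool : List (Int × Int × List String)) :
    List (Int × Int × List String) :=
  pool.take (insert_idx rec.1 pool) ++ [rec] ++ pool.drop (insert_idx rec.1 pool)

def stepB (n m : Int)
    (st : List (Int × Int × List String) × List (List String) × Int)
    (Ty : String × List String × List Int) :
    List (Int × Int × List String) × List (List String) × Int :=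
  let pool := st.1
  let P := st.2.1
  let k := st.2.2
  if (P.length : Int) < n then
    let si := top_m_B Ty m
    (insert_B (si.1, k, si.2) pool, P ++ [si.2], k + 1)
  else
    let u := Ty.2.2.sum
    match pool with
    | [] => (pool, P, k + 1)
    | h :: t =>
      if u > h.1 then
        let si := top_m_B Ty m
        let P' := (PySem.List.remove? P h.2.2).getD P
        (insert_B (si.1, k, si.2) t, P' ++ [si.2], k + 1)
      else (pool, P, k + 1)

def initial_solutions_alt (dataset : List (String × List String × List Int)) (n : Int) (m : Int) : List (List String) :=
  (dataset.foldl (stepB n m) ([], [], 0)).2.1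

-- ===== PRECONDITION & SPEC =====
-- Pre_ excludes exactly the inputs where Python A raises: a nonempty dataset with n < 1 makes
-- A call min() on the empty kept list (ValueError) in its first iteration.
def Pre_initial_solutions (dataset : List (String × List String × List Int)) (n : Int) (m : Int) : Prop :=
  dataset = [] ∨ 1 ≤ n
instance (dataset : List (String × List String × List Int)) (n : Int) (m : Int) : Decidable (Pre_initial_solutions dataset n m) := by unfold Pre_initial_solutions; infer_instance

def pvWitness_initial_solutions : (List (String × List String × List Int)) × Int × Int :=
  ([("t1", ["x", "y"], [5, 3]), ("t2", ["z"], [7])], 1, 1)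

def Spec_initial_solutions (dataset : List (String × List String × List Int)) (n : Int) (m : Int) (out : List (List String)) : Prop := out = initial_solutions_alt dataset n m
instance (dataset : List (String × List String × List Int)) (n : Int) (m : Int) (out : List (List String)) : Decidable (Spec_initial_solutions dataset n m out) := by unfold Spec_initial_solutions; infer_instance

-- ===== CLAIM (what is proved, stated in full; the proofs are below) =====
def Claim_equal_initial_solutions : Prop := ∀ (dataset : List (String × List String × List Int)) (n : Int) (m : Int), Dom_initial_solutions dataset n m → Pre_initial_solutions dataset n m → Spec_initial_solutions dataset n m (initial_solutions dataset n m)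

-- ===== LEMMAS AND PROOFS =====

-- B's pool is the insertion-sorted image of A's kept list: each B record carries
-- (TU of A's kept record, some append index, that record's top-m item list).
def MatchesRec (r : Int × Int × List String) (X : String × List String × List Int) : Prop :=
  r.1 = TU X ∧ r.2.2 = X.2.1

-- recursive characterisation of Source B's _insert, used by the proofs
def insRec (rec : Int × Int × List String) :
    List (Int × Int × List String) → List (Int × Int × List String)
  | [] => [rec]
  | h :: t => if h.1 ≤ rec.1 then h :: insRec rec t else rec :: h :: t

lemma insert_B_eq (rec : Int × Int × List String) (l : List (Int × Int × List String)) :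
    insert_B rec l = insRec rec l := by
  induction l with
  | nil => rfl
  | cons h t ih =>
    by_cases hc : h.1 ≤ rec.1
    · simp [insert_B, insRec, insert_idx, hc] at ih ⊢
      exact ih
    · simp [insert_B, insRec, insert_idx, hc]

def sortOf (tl : List (Int × Int × List String)) : List (Int × Int × List String) :=
  tl.foldl (fun acc r => insRec r acc) []

lemma topmB_eq (Ty : String × List String × List Int) (m : Int) :
    top_m_B Ty m = (TU (get_top_m_items Ty m), (get_top_m_items Ty m).2.1) := by
  simp [top_m_B, get_top_m_items, TU]

lemma sortOf_append_singleton (tl : List (Int × Int × List String)) (r : Int × Int × List String) :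
    sortOf (tl ++ [r]) = insRec r (sortOf tl) := by
  simp [sortOf]

lemma insertB_perm (r : Int × Int × List String) (l : List (Int × Int × List String)) :
    (insRec r l).Perm (r :: l) := by
  induction l with
  | nil => simp [insRec]
  | cons h t ih =>
    simp only [insRec]
    split
    · exact ((ih.cons h).trans (List.Perm.swap r h t))
    · exact List.Perm.refl _

lemma sortOf_perm (tl : List (Int × Int × List String)) : (sortOf tl).Perm tl := by
  induction tl using List.reverseRecOn with
  | nil => simp [sortOf]
  | append_singleton l a ih =>
    rw [sortOf_append_singleton]
    exact (insertB_perm a (sortOf l)).trans ((ih.cons a).trans (List.perm_append_singleton a l).symm)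

lemma insertB_of_lt (r : Int × Int × List String) (l : List (Int × Int × List String))
    (h : ∀ x ∈ l, r.1 < x.1) : insRec r l = r :: l := by
  cases l with
  | nil => rfl
  | cons a t =>
    simp only [insRec]
    have : ¬ a.1 ≤ r.1 := by
      have := h a (by simp)
      omega
    simp [this]

lemma insertB_cons_of_le (r a : Int × Int × List String) (t : List (Int × Int × List String))
    (h : a.1 ≤ r.1) : insRec r (a :: t) = a :: insRec r t := by
  simp [insRec, h]

-- the crux: sorting the tagged list puts a first-minimal record at the head,
-- and its tail is the sorted rest
lemma sortOf_min_decomp (mu : Int × Int × List String) :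
    ∀ (suf pre : List (Int × Int × List String)),
    (∀ x ∈ pre, mu.1 < x.1) → (∀ x ∈ suf, mu.1 ≤ x.1) →
    sortOf (pre ++ mu :: suf) = mu :: sortOf (pre ++ suf) := by
  intro suf
  induction suf using List.reverseRecOn with
  | nil =>
    intro pre hpre _
    rw [sortOf_append_singleton, List.append_nil]
    exact insertB_of_lt mu (sortOf pre) (fun x hx => hpre x ((sortOf_perm pre).mem_iff.mp hx))
  | append_singleton s y ih =>
    intro pre hpre hsuf
    have hy : mu.1 ≤ y.1 := hsuf y (by simp)
    have hs : ∀ x ∈ s, mu.1 ≤ x.1 := fun x hx => hsuf x (by simp [hx])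
    have e1 : pre ++ mu :: (s ++ [y]) = (pre ++ mu :: s) ++ [y] := by simp
    have e2 : pre ++ (s ++ [y]) = (pre ++ s) ++ [y] := by simp
    rw [e1, e2, sortOf_append_singleton, sortOf_append_singleton, ih pre hpre hs]
    exact insertB_cons_of_le y mu (sortOf (pre ++ s)) hy

-- firstness of PySem.List.min?: it returns the first element of minimal key
lemma min?_foldl_decomp {α : Type} (key : α → Int) :
    ∀ (xs : List α) (a m : α),
    List.foldl (fun acc x => match acc with
      | none => some x
      | some mm => if key x < key mm then some x else some mm) (some a) xs = some m →
    (m = a ∧ ∀ x ∈ xs, key a ≤ key x) ∨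
    (∃ pre suf, xs = pre ++ m :: suf ∧ key m < key a ∧
      (∀ x ∈ pre, key m < key x) ∧ (∀ x ∈ suf, key m ≤ key x)) := by
  intro xs
  induction xs with
  | nil => intro a m h; left; simp at h; exact ⟨h.symm, by simp⟩
  | cons x xs ih =>
    intro a m h
    simp only [List.foldl_cons] at h
    by_cases hx : key x < key a
    · simp only [hx, if_pos] at h
      rcases ih x m h with ⟨rfl, hall⟩ | ⟨pre, suf, rfl, hlt, hpre, hsuf⟩
      · right; exact ⟨[], xs, rfl, hx, by simp, hall⟩
      · right; exact ⟨x :: pre, suf, rfl, lt_trans hlt hx,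
          fun z hz => by rcases List.mem_cons.mp hz with rfl | hz; exact hlt; exact hpre z hz, hsuf⟩
    · simp only [hx] at h
      rcases ih a m h with ⟨rfl, hall⟩ | ⟨pre, suf, rfl, hlt, hpre, hsuf⟩
      · left; refine ⟨rfl, fun z hz => ?_⟩
        rcases List.mem_cons.mp hz with rfl | hz
        · omega
        · exact hall z hz
      · right; exact ⟨x :: pre, suf, rfl, hlt,
          fun z hz => by rcases List.mem_cons.mp hz with rfl | hz; omega; exact hpre z hz, hsuf⟩

lemma min?_first_decomp {α : Type} (key : α → Int) (xs : List α) (m : α)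
    (h : PySem.List.min? xs key = some m) :
    ∃ pre suf, xs = pre ++ m :: suf ∧ (∀ x ∈ pre, key m < key x) ∧ (∀ x ∈ suf, key m ≤ key x) := by
  cases xs with
  | nil => simp [PySem.List.min?] at h
  | cons a t =>
    have h' : List.foldl (fun acc x => match acc with
      | none => some x
      | some mm => if key x < key mm then some x else some mm) (some a) t = some m := by
      simpa [PySem.List.min?] using h
    rcases min?_foldl_decomp key t a m h' with ⟨rfl, hall⟩ | ⟨pre, suf, rfl, hlt, hpre, hsuf⟩
    · exact ⟨[], t, rfl, by simp, hall⟩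
    · exact ⟨a :: pre, suf, rfl,
        fun z hz => by rcases List.mem_cons.mp hz with rfl | hz; exact hlt; exact hpre z hz, hsuf⟩

lemma forall2_append_split {α β : Type} {R : α → β → Prop} :
    ∀ (l1 : List β) (l : List α) (l2 : List β), List.Forall₂ R l (l1 ++ l2) →
    ∃ a b, l = a ++ b ∧ List.Forall₂ R a l1 ∧ List.Forall₂ R b l2 := by
  intro l1
  induction l1 with
  | nil => intro l l2 h; exact ⟨[], l, rfl, List.Forall₂.nil, by simpa using h⟩
  | cons x xs ih =>
    intro l l2 h
    rcases List.forall₂_cons_right_iff.mp h with ⟨a, u', hr, hrest, rfl⟩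
    rcases ih u' l2 hrest with ⟨p, q, rfl, h1, h2⟩
    exact ⟨a :: p, q, rfl, List.Forall₂.cons hr h1, h2⟩

lemma forall2_append {α β : Type} {R : α → β → Prop} :
    ∀ {a : List α} {l1 : List β} {b : List α} {l2 : List β},
    List.Forall₂ R a l1 → List.Forall₂ R b l2 → List.Forall₂ R (a ++ b) (l1 ++ l2) := by
  intro a l1 b l2 h1 h2
  induction h1 with
  | nil => simpa using h2
  | cons hr _ ih => exact List.Forall₂.cons hr ih

lemma forall2_mem {α β : Type} {R : α → β → Prop} {l : List α} {l' : List β}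
    (h : List.Forall₂ R l l') {x : α} (hx : x ∈ l) : ∃ y ∈ l', R x y := by
  induction h with
  | nil => simp at hx
  | cons hr _ ih =>
    rcases List.mem_cons.mp hx with rfl | hx
    · exact ⟨_, by simp, hr⟩
    · rcases ih hx with ⟨y, hy, hry⟩
      exact ⟨y, by simp [hy], hry⟩

lemma loop_sim (n m : Int) :
    ∀ (ds : List (String × List String × List Int))
      (trP : List (String × List String × List Int))
      (pool : List (Int × Int × List String)) (P : List (List String)) (k : Int)
      (tl : List (Int × Int × List String)),
      List.Forall₂ MatchesRec tl trP → pool = sortOf tl →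
      (ds.foldl (stepA n m) (trP, P)).2 = (ds.foldl (stepB n m) (pool, P, k)).2.1 := by
  intro ds
  induction ds with
  | nil => intro _ _ _ _ _ _ _; simp
  | cons Ty ds ih =>
    intro trP pool P k tl hm hpool
    simp only [List.foldl_cons]
    by_cases hlen : (P.length : Int) < n
    · -- insert branch on both sides
      have hA : stepA n m (trP, P) Ty
          = (trP ++ [get_top_m_items Ty m], P ++ [(get_top_m_items Ty m).2.1]) := by
        simp [stepA, hlen]
      have hB : stepB n m (pool, P, k) Ty
          = (insRec (TU (get_top_m_items Ty m), k, (get_top_m_items Ty m).2.1) pool,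
             P ++ [(get_top_m_items Ty m).2.1], k + 1) := by
        simp [stepB, hlen, topmB_eq, insert_B_eq]
      rw [hA, hB]
      exact ih _ _ _ _ (tl ++ [(TU (get_top_m_items Ty m), k, (get_top_m_items Ty m).2.1)])
        (forall2_append hm (List.forall₂_cons.mpr ⟨⟨rfl, rfl⟩, List.Forall₂.nil⟩))
        (by rw [hpool, sortOf_append_singleton])
    · -- eviction branch
      cases htr : PySem.List.min? trP TU with
      | none =>
        -- trP = [], hence tl = [], pool = []
        have htrP : trP = [] := (PySem.List.min?_eq_none_iff trP TU).mp htr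
        subst htrP
        have htl : tl = [] := by cases hm; rfl
        subst htl
        have hp : pool = [] := by simpa [sortOf] using hpool
        subst hp
        have hA : stepA n m ([], P) Ty = ([], P) := by simp [stepA, hlen, PySem.List.min?]
        have hB : stepB n m ([], P, k) Ty = ([], P, k + 1) := by simp [stepB, hlen]
        rw [hA, hB]
        exact ih _ _ _ _ [] List.Forall₂.nil rfl
      | some mu =>
        rcases min?_first_decomp TU trP mu htr with ⟨pre, suf, hdec, hpre, hsuf⟩
        rcases forall2_append_split pre tl (mu :: suf) (hdec ▸ hm) with ⟨tpre, trest, htl, hmpre, hmrest⟩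
        rcases List.forall₂_cons_right_iff.mp hmrest with ⟨r, tsuf, hrmu, hmsuf, htrest⟩
        subst htrest
        -- pool decomposes as r :: sortOf (tpre ++ tsuf)
        have hrpre : ∀ x ∈ tpre, r.1 < x.1 := by
          intro x hx
          rcases forall2_mem hmpre hx with ⟨y, hy, hxy⟩
          rw [hxy.1, hrmu.1]
          exact hpre y hy
        have hrsuf : ∀ x ∈ tsuf, r.1 ≤ x.1 := by
          intro x hx
          rcases forall2_mem hmsuf hx with ⟨y, hy, hxy⟩
          rw [hxy.1, hrmu.1]
          exact hsuf y hy
        have hpool' : pool = r :: sortOf (tpre ++ tsuf) := by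
          rw [hpool, htl, sortOf_min_decomp r tsuf tpre hrpre hrsuf]
        -- mu not in pre (strictly larger TU), so erase removes exactly the middle
        have hmunotpre : mu ∉ pre := by
          intro hc
          exact absurd (hpre mu hc) (lt_irrefl _)
        have hremove : PySem.List.remove? trP mu = some (pre ++ suf) := by
          rw [PySem.List.remove?_eq_some_erase trP mu (by rw [hdec]; simp)]
          rw [hdec, List.erase_append_right _ hmunotpre, List.erase_cons_head]
        by_cases hu : TU Ty > TU mu
        · have hA : stepA n m (trP, P) Ty
              = ((pre ++ suf) ++ [get_top_m_items Ty m],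
                 ((PySem.List.remove? P mu.2.1).getD P) ++ [(get_top_m_items Ty m).2.1]) := by
            simp [stepA, hlen, htr, hu, hremove]
          have hB : stepB n m (pool, P, k) Ty
              = (insRec (TU (get_top_m_items Ty m), k, (get_top_m_items Ty m).2.1) (sortOf (tpre ++ tsuf)),
                 ((PySem.List.remove? P mu.2.1).getD P) ++ [(get_top_m_items Ty m).2.1], k + 1) := by
            have hu' : Ty.2.2.sum > r.1 := by rw [hrmu.1]; exact hu
            rw [hpool']
            simp [stepB, hlen, hu', topmB_eq, hrmu.2, insert_B_eq]
          rw [hA, hB]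
          exact ih _ _ _ _ ((tpre ++ tsuf) ++ [(TU (get_top_m_items Ty m), k, (get_top_m_items Ty m).2.1)])
            (forall2_append (forall2_append hmpre hmsuf)
              (List.forall₂_cons.mpr ⟨⟨rfl, rfl⟩, List.Forall₂.nil⟩))
            (by rw [sortOf_append_singleton])
        · have hA : stepA n m (trP, P) Ty = (trP, P) := by
            simp [stepA, hlen, htr, hu]
          have hB : stepB n m (pool, P, k) Ty = (pool, P, k + 1) := by
            have hu' : ¬ Ty.2.2.sum > r.1 := by rw [hrmu.1]; exact hu
            rw [hpool']
            simp [stepB, hlen, hu']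
          rw [hA, hB]
          exact ih _ _ _ _ tl hm hpool

-- ===== VERDICT (by name: the statement is the Claim_ definition above) =====
theorem initial_solutions_spec : Claim_equal_initial_solutions := by
  intro dataset n m _ _
  unfold Spec_initial_solutions initial_solutions initial_solutions_alt
  exact loop_sim n m dataset [] [] [] 0 [] List.Forall₂.nil rfl
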